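-- pv_equiv track=rewrite | github.com/dybala-21/rune | rune/agent/loop.py | _compact_messages_atomic
-- ===== SOURCE A (Python) =====
-- def _compact_messages_atomic(messages: list, keep_last: int) -> list:
--     """Compact messages preserving assistant+tool pairs.
--
--     When compacting, assistant messages are never split from their
--     subsequent tool result messages. This prevents broken context
--     where a tool result appears without the call that produced it.
--     """
--     # Walk backward, grouping assistant messages with their tool results
--     groups: list[list] = []
--     i = len(messages) - 1
--     while i >= 0:
--         msg = messages[i]
--         role = msg.get("role") if isinstance(msg, dict) else getattr(msg, "role", "")
--         if role == "tool":
--             # Find the preceding assistant message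
--             group = [msg]
--             if i > 0:
--                 prev = messages[i - 1]
--                 prev_role = prev.get("role") if isinstance(prev, dict) else getattr(prev, "role", "")
--                 if prev_role == "assistant":
--                     group.insert(0, prev)
--                     i -= 1
--             groups.insert(0, group)
--         else:
--             groups.insert(0, [msg])
--         i -= 1
--
--     # Keep last N groups
--     kept_groups = groups[-keep_last:]
--     return [msg for group in kept_groups for msg in group]
-- ===== SOURCE B (Python) =====
-- def _compact_messages_atomic(messages: list, keep_last: int) -> list:
--     """Keep the last keep_last assistant+tool groups.
--
--     The groups partition messages into contiguous runs, so the kept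
--     groups flattened are simply a suffix of messages: compute the list
--     of group-start indices, slice it, and return one suffix of messages.
--     """
--     starts = [i for i in range(len(messages))
--               if not (messages[i].get("role") == "tool" and i > 0
--                       and messages[i - 1].get("role") == "assistant")]
--     kept = starts[-keep_last:]
--     return messages[kept[0]:] if kept else []
-- ===== Notes on version B (the rewrite author's own statement) =====
-- stated objective: alternative
-- what changed: B never builds the nested group lists: since the groups partition messages into contiguous runs, it computes the list of group-start indices in one forward pass, slices that index list, and returns a single suffix of messages.
import Mathlib
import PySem

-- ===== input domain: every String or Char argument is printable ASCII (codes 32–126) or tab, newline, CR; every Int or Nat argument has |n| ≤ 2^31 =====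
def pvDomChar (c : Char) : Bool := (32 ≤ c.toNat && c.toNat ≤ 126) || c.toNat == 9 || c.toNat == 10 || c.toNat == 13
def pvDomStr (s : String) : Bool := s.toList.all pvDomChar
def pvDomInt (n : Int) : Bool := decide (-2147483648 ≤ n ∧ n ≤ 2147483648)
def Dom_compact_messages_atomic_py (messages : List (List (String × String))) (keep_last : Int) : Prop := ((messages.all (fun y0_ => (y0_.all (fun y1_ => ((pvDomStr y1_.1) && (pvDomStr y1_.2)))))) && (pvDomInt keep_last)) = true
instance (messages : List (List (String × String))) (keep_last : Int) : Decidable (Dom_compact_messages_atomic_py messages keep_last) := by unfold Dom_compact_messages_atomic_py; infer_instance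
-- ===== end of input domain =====

-- B replaces A's backward walk that builds nested group lists by a forward scan
-- computing only the group-START indices, slicing that index list, and returning
-- one suffix of messages; objective: alternative (no nested lists, single suffix).

-- ===== PORT A =====
-- msg.get("role") on the association-list dict (first match, none if absent)
def pvRole (msg : List (String × String)) : Option String :=
  (PySem.Dict.mk msg).get? "role"

-- A's backward while-loop; i stays in range on every reachable state, so the
-- `.getD []` default of messages[i] is never used.
def pvALoop (messages : List (List (String × String))) (i : Int)
    (groups : List (List (List (String × String)))) : List (List (List (String × String))) :=
  if _h : 0 ≤ i then
    let msg := (PySem.List.pyGet? messages i).getD []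
    if pvRole msg = some "tool" then
      if 0 < i then
        let prev := (PySem.List.pyGet? messages (i - 1)).getD []
        if pvRole prev = some "assistant" then
          pvALoop messages (i - 2) ([prev, msg] :: groups)      -- group.insert(0, prev); groups.insert(0, group); i -= 1 twice
        else
          pvALoop messages (i - 1) ([msg] :: groups)
      else
        pvALoop messages (i - 1) ([msg] :: groups)
    else
      pvALoop messages (i - 1) ([msg] :: groups)                 -- groups.insert(0, [msg])
  else groups
  termination_by (i + 1).toNat
  decreasing_by all_goals omega

def compact_messages_atomic_py (messages : List (List (String × String))) (keep_last : Int) : List (List (String × String)) :=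
  let groups := pvALoop messages ((messages.length : Int) - 1) []
  let kept_groups := PySem.List.slice groups (some (-keep_last)) none
  kept_groups.flatMap (fun group => group)                       -- [msg for group in kept_groups for msg in group]

-- ===== PORT B =====
-- the comprehension's condition: index i starts a group
def pvStartB (messages : List (List (String × String))) (i : Int) : Bool :=
  !(pvRole ((PySem.List.pyGet? messages i).getD []) == some "tool"
    && decide (0 < i)
    && pvRole ((PySem.List.pyGet? messages (i - 1)).getD []) == some "assistant")

def compact_messages_atomic_py_alt (messages : List (List (String × String))) (keep_last : Int) : List (List (String × String)) :=
  let starts := (PySem.List.pyRange 0 (messages.length : Int) 1).filter (pvStartB messages)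
  let kept := PySem.List.slice starts (some (-keep_last)) none
  match kept with                                                 -- messages[kept[0]:] if kept else []
  | [] => []
  | j :: _ => PySem.List.slice messages (some j) none

-- ===== PRECONDITION & SPEC =====
def Spec_compact_messages_atomic_py (messages : List (List (String × String))) (keep_last : Int) (out : List (List (String × String))) : Prop := out = compact_messages_atomic_py_alt messages keep_last
instance (messages : List (List (String × String))) (keep_last : Int) (out : List (List (String × String))) : Decidable (Spec_compact_messages_atomic_py messages keep_last out) := by unfold Spec_compact_messages_atomic_py; infer_instance

-- ===== CLAIM (what is proved, stated in full; the proofs are below) =====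
def Claim_equal_compact_messages_atomic_py : Prop := ∀ (messages : List (List (String × String))) (keep_last : Int), Dom_compact_messages_atomic_py messages keep_last → Spec_compact_messages_atomic_py messages keep_last (compact_messages_atomic_py messages keep_last)

-- ===== LEMMAS AND PROOFS =====

-- group-start offsets of a group list: position in the flattening of each group
def pvOffs (G : List (List (List (String × String)))) : List Int :=
  (List.range G.length).map (fun j => (((G.take j).flatten).length : Int))

theorem pvOffs_append_singleton (G : List (List (List (String × String))))
    (g : List (List (String × String))) :
    pvOffs (G ++ [g]) = pvOffs G ++ [(G.flatten.length : Int)] := by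
  simp only [pvOffs, List.length_append, List.length_singleton, List.range_succ,
    List.map_append, List.map_cons, List.map_nil]
  congr 1
  · apply List.map_congr_left
    intro j hj
    rw [List.mem_range] at hj
    rw [List.take_append_of_le_length (by omega)]
  · rw [List.take_left]

-- A's loop with accumulator = core result prepended to the accumulator.
theorem pvALoop_acc (messages : List (List (String × String))) (i : Int)
    (groups : List (List (List (String × String)))) :
    pvALoop messages i groups = pvALoop messages i [] ++ groups := by
  induction hn : (i + 1).toNat using Nat.strong_induction_on generalizing i groups with
  | _ n ih =>
  rw [pvALoop, pvALoop]
  by_cases h0 : 0 ≤ i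
  · simp only [h0, dite_true]
    split_ifs with ht hi ha
    · rw [ih ((i - 2) + 1).toNat (by omega) (i - 2) _ rfl,
        ih ((i - 2) + 1).toNat (by omega) (i - 2) [_] rfl]
      simp
    · rw [ih ((i - 1) + 1).toNat (by omega) (i - 1) _ rfl,
        ih ((i - 1) + 1).toNat (by omega) (i - 1) [_] rfl]
      simp
    · rw [ih ((i - 1) + 1).toNat (by omega) (i - 1) _ rfl,
        ih ((i - 1) + 1).toNat (by omega) (i - 1) [_] rfl]
      simp
    · rw [ih ((i - 1) + 1).toNat (by omega) (i - 1) _ rfl,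
        ih ((i - 1) + 1).toNat (by omega) (i - 1) [_] rfl]
      simp
  · simp [h0]

theorem pv_take_succ_of_lt (l : List (List (String × String))) (n : Nat) (h : n < l.length) :
    l.take (n + 1) = l.take n ++ [l[n]] := by
  rw [List.take_succ]; simp [List.getElem?_eq_getElem h]

-- shared step for the three single-message branches of A's loop
theorem pvALoop_inv_step (messages : List (List (String × String))) (i : Int)
    (h0 : 0 ≤ i) (hin : i < (messages.length : Int))
    (hstart : pvStartB messages i = true)
    (IH1 : (pvALoop messages (i - 1) []).flatten = messages.take ((i - 1) + 1).toNat)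
    (IH2 : pvOffs (pvALoop messages (i - 1) []) =
      (PySem.List.pyRange 0 ((i - 1) + 1) 1).filter (pvStartB messages)) :
    (pvALoop messages (i - 1) [] ++ [[(PySem.List.pyGet? messages i).getD []]]).flatten =
      messages.take (i + 1).toNat ∧
    pvOffs (pvALoop messages (i - 1) [] ++ [[(PySem.List.pyGet? messages i).getD []]]) =
      (PySem.List.pyRange 0 (i + 1) 1).filter (pvStartB messages) := by
  have hm : i.toNat < messages.length := by omega
  have hmsg : (PySem.List.pyGet? messages i).getD ([] : List (String × String)) = messages[i.toNat] := by
    rw [PySem.List.pyGet?_eq_some_getElem messages h0 hin]; rfl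
  have hone : ((i - 1) + 1) = i := by ring
  have hflat : (pvALoop messages (i - 1) []).flatten = messages.take i.toNat := by
    rw [IH1, hone]
  constructor
  · rw [List.flatten_append, hflat, hmsg]
    rw [show (i + 1).toNat = i.toNat + 1 by omega, pv_take_succ_of_lt messages i.toNat hm]
    simp
  · rw [pvOffs_append_singleton, IH2, hone, hflat]
    rw [List.length_take, show min i.toNat messages.length = i.toNat by omega]
    rw [PySem.List.pyRange_one_succ_right (by omega : (0:Int) ≤ i), List.filter_append]
    rw [show ((i.toNat : Nat) : Int) = i by omega]
    simp [hstart]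

-- Invariant of A's loop: its groups flatten to the processed prefix of messages,
-- and their start offsets are exactly B's comprehension restricted to that prefix.
theorem pvALoop_inv (messages : List (List (String × String))) : ∀ (i : Int),
    i < (messages.length : Int) →
    (pvALoop messages i []).flatten = messages.take (i + 1).toNat ∧
    pvOffs (pvALoop messages i []) =
      (PySem.List.pyRange 0 (i + 1) 1).filter (pvStartB messages) := by
  intro i
  induction hn : (i + 1).toNat using Nat.strong_induction_on generalizing i with
  | _ n ih =>
  intro hin
  subst hn
  rw [pvALoop]
  by_cases h0 : 0 ≤ i
  · simp only [h0, dite_true]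
    split_ifs with ht hi2 ha
    · -- tool with preceding assistant: two messages consumed, one group appended
      rw [pvALoop_acc]
      have hm : i.toNat < messages.length := by omega
      have hp : (i - 1).toNat < messages.length := by omega
      have hmsg : (PySem.List.pyGet? messages i).getD ([] : List (String × String)) = messages[i.toNat] := by
        rw [PySem.List.pyGet?_eq_some_getElem messages h0 hin]; rfl
      have hprev : (PySem.List.pyGet? messages (i - 1)).getD ([] : List (String × String)) = messages[(i - 1).toNat] := by
        rw [PySem.List.pyGet?_eq_some_getElem messages (by omega) (by omega)]; rfl
      obtain ⟨IH1, IH2⟩ := ih ((i - 2) + 1).toNat (by omega) (i - 2) rfl (by omega)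
      have hstart1 : pvStartB messages (i - 1) = true := by
        simp [pvStartB, ha]
      have hstart0 : pvStartB messages i = false := by
        simp [pvStartB, ht, ha, show (0:Int) < i from hi2]
      constructor
      · rw [List.flatten_append, IH1, hmsg, hprev,
          show ((i - 2) + 1) = i - 1 by ring]
        conv_rhs => rw [show (i + 1).toNat = ((i - 1).toNat + 1) + 1 by omega,
          pv_take_succ_of_lt messages ((i - 1).toNat + 1) (by omega),
          pv_take_succ_of_lt messages ((i - 1).toNat) hp]
        have hm2 : messages[(i - 1).toNat + 1]'(by omega) = messages[i.toNat]'hm := by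
          congr 1
          omega
        rw [hm2]
        simp
        rw [pv_take_succ_of_lt messages (i.toNat - 1) (by omega), List.append_assoc]
        simp
      · rw [pvOffs_append_singleton, IH2, IH1]
        rw [show ((i - 2) + 1) = i - 1 by ring]
        rw [List.length_take, show min (i - 1).toNat messages.length = (i - 1).toNat by omega]
        rw [PySem.List.pyRange_one_append 0 (i - 1) (i + 1) (by omega) (by omega),
          PySem.List.pyRange_one_cons (by omega : i - 1 < i + 1),
          show (i - 1) + 1 = i by ring, PySem.List.pyRange_one_singleton,
          List.filter_append]
        rw [show (((i - 1).toNat : Nat) : Int) = i - 1 by omega]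
        simp [hstart1, hstart0]
    · rw [pvALoop_acc]
      obtain ⟨IH1, IH2⟩ := ih ((i - 1) + 1).toNat (by omega) (i - 1) rfl (by omega)
      exact pvALoop_inv_step messages i h0 hin
        (by simp [pvStartB, ht, show (0:Int) < i from hi2, ha]) IH1 IH2
    · rw [pvALoop_acc]
      obtain ⟨IH1, IH2⟩ := ih ((i - 1) + 1).toNat (by omega) (i - 1) rfl (by omega)
      exact pvALoop_inv_step messages i h0 hin (by simp [pvStartB, hi2]) IH1 IH2
    · rw [pvALoop_acc]
      obtain ⟨IH1, IH2⟩ := ih ((i - 1) + 1).toNat (by omega) (i - 1) rfl (by omega)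
      exact pvALoop_inv_step messages i h0 hin (by simp [pvStartB, ht]) IH1 IH2
  · constructor
    · simp only [h0, dite_false]
      rw [show (i + 1).toNat = 0 by omega]
      simp
    · simp only [h0, dite_false]
      rw [PySem.List.pyRange_one_eq_nil (by omega)]
      simp [pvOffs]

-- ===== VERDICT (by name: the statement is the Claim_ definition above) =====
theorem compact_messages_atomic_py_spec : Claim_equal_compact_messages_atomic_py := by
  intro messages keep_last _
  unfold Spec_compact_messages_atomic_py compact_messages_atomic_py compact_messages_atomic_py_alt
  dsimp only
  obtain ⟨hf, ho⟩ := pvALoop_inv messages ((messages.length : Int) - 1) (by omega)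
  rw [show ((messages.length : Int) - 1) + 1 = (messages.length : Int) by ring] at hf ho
  set G := pvALoop messages ((messages.length : Int) - 1) [] with hG
  have hflat : G.flatten = messages := by
    rw [hf, show ((messages.length : Int)).toNat = messages.length by omega, List.take_length]
  have hlen : (pvOffs G).length = G.length := by simp [pvOffs]
  rw [← ho, PySem.List.slice_some_none, PySem.List.slice_some_none, hlen]
  set d := PySem.List.clampIdx G.length (-keep_last) with hd
  have hdle : d ≤ G.length := PySem.List.clampIdx_le _ _
  by_cases hdl : d < G.length
  · have hlt' : d < (pvOffs G).length := by simpa [pvOffs] using hdl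
    rw [List.drop_eq_getElem_cons hlt']
    have hget : (pvOffs G)[d] = (((G.take d).flatten.length : Nat) : Int) := by
      simp [pvOffs]
    rw [hget]
    show List.flatMap (fun group => group) (List.drop d G)
        = PySem.List.slice messages (some (((List.take d G).flatten.length : Nat) : Int)) none
    have hsplit : messages = (G.take d).flatten ++ (G.drop d).flatten := by
      rw [← List.flatten_append, List.take_append_drop, hflat]
    rw [PySem.List.slice_from messages (Int.natCast_nonneg _), Int.toNat_natCast]
    conv_rhs => rw [hsplit]
    rw [List.drop_left]
    simp
  · have hde : d = G.length := by omega
    have h1 : G.drop d = [] := by rw [hde]; simp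
    have h2 : (pvOffs G).drop d = [] := by
      apply List.drop_eq_nil_of_le; simp [pvOffs, hde]
    rw [h1, h2]
    simp
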